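-- pv_equiv track=rewrite | github.com/luo-songtao/TheAlgorithmsNotesInPython | src/dynamic_programming/matrix_chain_multiplication_problem.py | buttom_up_dynamic_programming
-- ===== SOURCE A (Python) =====
-- import math
--
-- def buttom_up_dynamic_programming(matrix_chain_dims):
--     """
--     自底向上
--     >>> matrix_chain_dims = [(30,35), (35, 15), (15, 5), (5,10), (10, 20), (20, 25)]
--     >>> buttom_up_dynamic_programming(matrix_chain_dims)
--     15125
--     """
--
--     costs = {}
--     for x  in range(len(matrix_chain_dims)):
--         costs[(x,x)] = 0
--     for gap in range(1, len(matrix_chain_dims)):    # 分批计算出间隔为1，2，3...n-1的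
--         for i in range(len(matrix_chain_dims)-gap):
--             j = i + gap
--             cost = math.inf
--             for k in range(i, j):
--                 the_cost = costs[(i,k)] + costs[(k+1,j)] + matrix_chain_dims[i][0] * matrix_chain_dims[k][1] * matrix_chain_dims[j][1]
--                 cost = min(cost, the_cost)
--             costs[(i,j)] = cost
--     return costs[(0,len(matrix_chain_dims)-1)]
-- ===== SOURCE B (Python) =====
-- def buttom_up_dynamic_programming(matrix_chain_dims):
--     n = len(matrix_chain_dims)
--     memo = {}
--
--     def solve(i, j):
--         if i == j:
--             return 0
--         if (i, j) in memo:
--             return memo[(i, j)]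
--         best = None
--         for k in range(i, j):
--             c = solve(i, k) + solve(k + 1, j) + \
--                 matrix_chain_dims[i][0] * matrix_chain_dims[k][1] * matrix_chain_dims[j][1]
--             if best is None or c < best:
--                 best = c
--         memo[(i, j)] = best
--         return best
--
--     return solve(0, n - 1)
-- ===== Notes on version B (the rewrite author's own statement) =====
-- stated objective: alternative
-- what changed: replaces A's iterative gap-by-gap bottom-up table filling with top-down recursion over subchains plus a dict memo (computed on demand, running-min with None sentinel instead of math.inf), same exact minimum cost
import Mathlib
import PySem

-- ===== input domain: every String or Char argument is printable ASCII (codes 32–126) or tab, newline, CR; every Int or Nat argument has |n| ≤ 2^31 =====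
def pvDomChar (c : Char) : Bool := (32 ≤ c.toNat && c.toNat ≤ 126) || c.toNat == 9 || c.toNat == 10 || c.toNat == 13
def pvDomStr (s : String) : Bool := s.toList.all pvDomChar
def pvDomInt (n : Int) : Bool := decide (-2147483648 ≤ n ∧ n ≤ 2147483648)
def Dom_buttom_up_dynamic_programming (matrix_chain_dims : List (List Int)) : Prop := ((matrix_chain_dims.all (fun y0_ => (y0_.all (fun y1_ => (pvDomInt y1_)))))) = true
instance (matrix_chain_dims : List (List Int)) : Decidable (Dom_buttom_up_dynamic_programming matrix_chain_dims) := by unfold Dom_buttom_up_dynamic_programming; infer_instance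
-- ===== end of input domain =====

-- B replaces A's bottom-up gap-by-gap table with top-down memoized recursion over subchains; same exact result, same asymptotic cost.


-- shared helper: the multiplication-cost term dims[i][0]*dims[k][1]*dims[j][1]
-- (pyGetD is exact under Pre_, where every index is in range)
def pvW (dims : List (List Int)) (i k j : Int) : Int :=
  PySem.List.pyGetD (PySem.List.pyGetD dims i []) 0 0 *
  PySem.List.pyGetD (PySem.List.pyGetD dims k []) 1 0 *
  PySem.List.pyGetD (PySem.List.pyGetD dims j []) 1 0

-- ===== PORT A =====
-- literal transliteration of A: init costs[(x,x)]=0, then for gap in 1..n-1, for i in 0..n-gap-1,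
-- cost = running min over k (math.inf ported as the Option none state), insert, finally costs[(0,n-1)]
def buttom_up_dynamic_programming (matrix_chain_dims : List (List Int)) : Int :=
  let n : Int := (matrix_chain_dims.length : Int)
  let costs : PySem.Dict (Int × Int) Int :=
    (PySem.List.pyRange 0 n 1).foldl (fun d x => d.insert (x, x) 0) PySem.Dict.empty
  let costs :=
    (PySem.List.pyRange 1 n 1).foldl (fun costs gap =>
      (PySem.List.pyRange 0 (n - gap) 1).foldl (fun costs i =>
        let j := i + gap
        let cost : Option Int :=
          (PySem.List.pyRange i j 1).foldl (fun cost k =>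
            let the_cost := costs.getD (i, k) 0 + costs.getD (k + 1, j) 0 + pvW matrix_chain_dims i k j
            some (match cost with
                  | none => the_cost
                  | some c => min c the_cost)) none
        costs.insert (i, j) (cost.getD 0)) costs) costs
  costs.getD (0, n - 1) 0

-- ===== PORT B =====
-- literal transliteration of B's recursive solve(i, j) with dict memo threaded through;
-- fuel ≥ j - i only makes the recursion total (B's recursion always terminates on its own)
def pvSolve (dims : List (List Int)) :
    Nat → Int → Int → PySem.Dict (Int × Int) Int → Int × PySem.Dict (Int × Int) Int
  | fuel, i, j, memo =>
    if i == j then (0, memo)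
    else
      match memo.get? (i, j) with
      | some v => (v, memo)
      | none =>
        match fuel with
        | 0 => (0, memo)  -- unreachable when fuel ≥ j - i
        | Nat.succ f =>
          let r :=
            (PySem.List.pyRange i j 1).foldl (fun bm k =>
              let r1 := pvSolve dims f i k bm.2
              let r2 := pvSolve dims f (k + 1) j r1.2
              let c := r1.1 + r2.1 + pvW dims i k j
              ((match bm.1 with
                | none => some c
                | some best => if c < best then some c else some best), r2.2))
              ((none : Option Int), memo)
          let best := r.1.getD 0
          (best, r.2.insert (i, j) best)

def buttom_up_dynamic_programming_alt (matrix_chain_dims : List (List Int)) : Int :=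
  let n : Int := (matrix_chain_dims.length : Int)
  (pvSolve matrix_chain_dims matrix_chain_dims.length 0 (n - 1) PySem.Dict.empty).1

-- ===== PRECONDITION & SPEC =====
-- Pre_ excludes exactly the inputs where Python A raises: the empty list (KeyError on the final table lookup)
-- and, when there are ≥ 2 matrices, any dimension row of length < 2 (IndexError on row[1]).
def Pre_buttom_up_dynamic_programming (matrix_chain_dims : List (List Int)) : Prop :=
  matrix_chain_dims ≠ [] ∧
    (2 ≤ matrix_chain_dims.length → ∀ row ∈ matrix_chain_dims, 2 ≤ row.length)
instance (matrix_chain_dims : List (List Int)) : Decidable (Pre_buttom_up_dynamic_programming matrix_chain_dims) := by unfold Pre_buttom_up_dynamic_programming; infer_instance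

def pvWitness_buttom_up_dynamic_programming : List (List Int) :=
  [[30, 35], [35, 15], [15, 5], [5, 10], [10, 20], [20, 25]]

def Spec_buttom_up_dynamic_programming (matrix_chain_dims : List (List Int)) (out : Int) : Prop := out = buttom_up_dynamic_programming_alt matrix_chain_dims
instance (matrix_chain_dims : List (List Int)) (out : Int) : Decidable (Spec_buttom_up_dynamic_programming matrix_chain_dims out) := by unfold Spec_buttom_up_dynamic_programming; infer_instance

-- ===== CLAIM (what is proved, stated in full; the proofs are below) =====
def Claim_equal_buttom_up_dynamic_programming : Prop := ∀ (matrix_chain_dims : List (List Int)), Dom_buttom_up_dynamic_programming matrix_chain_dims → Pre_buttom_up_dynamic_programming matrix_chain_dims → Spec_buttom_up_dynamic_programming matrix_chain_dims (buttom_up_dynamic_programming matrix_chain_dims)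

-- ===== LEMMAS AND PROOFS =====

-- canonical running-min fold (shape of A's inner k-loop)
def pvOMin (c : Int → Int) (l : List Int) (b : Option Int) : Option Int :=
  l.foldl (fun b k =>
    some (match b with
          | none => c k
          | some v => min v (c k))) b

-- reference value: the matrix-chain recurrence, fuel-indexed
def pvMC (dims : List (List Int)) : Nat → Int → Int → Int
  | 0, _, _ => 0
  | Nat.succ f, i, j =>
    if i < j then
      (pvOMin (fun k => pvMC dims f i k + pvMC dims f (k + 1) j + pvW dims i k j)
        (PySem.List.pyRange i j 1) none).getD 0
    else 0

theorem pvOMin_congr (c c' : Int → Int) :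
    ∀ (l : List Int) (b : Option Int), (∀ k ∈ l, c k = c' k) → pvOMin c l b = pvOMin c' l b := by
  intro l
  induction l with
  | nil => intro b h; rfl
  | cons x t ih =>
    intro b h
    simp only [pvOMin, List.foldl_cons] at *
    rw [h x (by simp)]
    exact ih _ (fun k hk => h k (by simp [hk]))

theorem pvMC_nlt (dims : List (List Int)) (f : Nat) (i j : Int) (h : ¬ i < j) :
    pvMC dims f i j = 0 := by
  cases f with
  | zero => rfl
  | succ f => simp [pvMC, h]

theorem pvMC_fuel (dims : List (List Int)) :
    ∀ (f f' : Nat) (i j : Int), (j - i).toNat ≤ f → (j - i).toNat ≤ f' →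
      pvMC dims f i j = pvMC dims f' i j := by
  intro f
  induction f with
  | zero =>
    intro f' i j hf hf'
    have hij : ¬ i < j := by omega
    rw [pvMC_nlt dims 0 i j hij, pvMC_nlt dims f' i j hij]
  | succ f ih =>
    intro f' i j hf hf'
    by_cases hij : i < j
    · obtain ⟨f'', rfl⟩ : ∃ f'', f' = f'' + 1 := ⟨f' - 1, by omega⟩
      simp only [pvMC, if_pos hij]
      rw [pvOMin_congr]
      intro k hk
      rw [PySem.List.mem_pyRange_one] at hk
      rw [ih f'' i k (by omega) (by omega), ih f'' (k + 1) j (by omega) (by omega)]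
    · rw [pvMC_nlt dims _ i j hij, pvMC_nlt dims f' i j hij]

-- ---------- B side ----------

def pvGoodM (dims : List (List Int)) (m : PySem.Dict (Int × Int) Int) : Prop :=
  ∀ (i j : Int) (v : Int), m.get? (i, j) = some v → i ≤ j ∧ v = pvMC dims (j - i).toNat i j

theorem pvSolve_spec (dims : List (List Int)) :
    ∀ (f : Nat) (i j : Int) (m : PySem.Dict (Int × Int) Int),
      i ≤ j → (j - i).toNat ≤ f → pvGoodM dims m →
      (pvSolve dims f i j m).1 = pvMC dims f i j ∧ pvGoodM dims (pvSolve dims f i j m).2 := by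
  intro f
  induction f with
  | zero =>
    intro i j m hij hf hm
    have : i = j := by omega
    subst this
    simp [pvSolve, pvMC, hm]
  | succ f ih =>
    intro i j m hij hf hm
    by_cases heq : i = j
    · subst heq
      simp [pvSolve, pvMC, hm]
    · have hlt : i < j := by omega
      have hbe : (i == j) = false := by simp [heq]
      rcases hg : m.get? (i, j) with _ | v
      · -- memo miss: the k-loop
        have key : ∀ (l : List Int), (∀ k ∈ l, i ≤ k ∧ k < j) →
            ∀ (b : Option Int) (m0 : PySem.Dict (Int × Int) Int), pvGoodM dims m0 →
            (l.foldl (fun bm k =>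
              let r1 := pvSolve dims f i k bm.2
              let r2 := pvSolve dims f (k + 1) j r1.2
              let c := r1.1 + r2.1 + pvW dims i k j
              ((match bm.1 with
                | none => some c
                | some best => if c < best then some c else some best), r2.2))
              (b, m0)).1 =
              pvOMin (fun k => pvMC dims f i k + pvMC dims f (k + 1) j + pvW dims i k j) l b ∧
            pvGoodM dims (l.foldl (fun bm k =>
              let r1 := pvSolve dims f i k bm.2
              let r2 := pvSolve dims f (k + 1) j r1.2
              let c := r1.1 + r2.1 + pvW dims i k j
              ((match bm.1 with
                | none => some c
                | some best => if c < best then some c else some best), r2.2))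
              (b, m0)).2 := by
          intro l
          induction l with
          | nil => intro _ b m0 hm0; exact ⟨rfl, hm0⟩
          | cons k t iht =>
            intro hmem b m0 hm0
            have hk := hmem k (by simp)
            have h1 := ih i k m0 hk.1 (by omega) hm0
            have h2 := ih (k + 1) j (pvSolve dims f i k m0).2 (by omega) (by omega) h1.2
            simp only [List.foldl_cons]
            have hstep :
                ((match b with
                  | none => some ((pvSolve dims f i k m0).1 + (pvSolve dims f (k+1) j (pvSolve dims f i k m0).2).1 + pvW dims i k j)
                  | some best =>
                    if (pvSolve dims f i k m0).1 + (pvSolve dims f (k+1) j (pvSolve dims f i k m0).2).1 + pvW dims i k j < best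
                    then some ((pvSolve dims f i k m0).1 + (pvSolve dims f (k+1) j (pvSolve dims f i k m0).2).1 + pvW dims i k j)
                    else some best) : Option Int) =
                some (match b with
                      | none => pvMC dims f i k + pvMC dims f (k + 1) j + pvW dims i k j
                      | some v => min v (pvMC dims f i k + pvMC dims f (k + 1) j + pvW dims i k j)) := by
              rw [h1.1, h2.1]
              cases b with
              | none => rfl
              | some v =>
                simp only []
                split_ifs with hc <;> simp [min_def] <;> omega
            refine (iht (fun k' hk' => hmem k' (by simp [hk'])) _ _ h2.2).imp ?_ id
            intro hval
            rw [pvOMin]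
            simp only [List.foldl_cons]
            rw [← pvOMin]
            convert hval using 2
            exact hstep.symm
        have hkey := key (PySem.List.pyRange i j 1)
          (fun k hk => by rw [PySem.List.mem_pyRange_one] at hk; omega) none m hm
        have hres : pvSolve dims (f + 1) i j m =
            (((PySem.List.pyRange i j 1).foldl (fun bm k =>
              let r1 := pvSolve dims f i k bm.2
              let r2 := pvSolve dims f (k + 1) j r1.2
              let c := r1.1 + r2.1 + pvW dims i k j
              ((match bm.1 with
                | none => some c
                | some best => if c < best then some c else some best), r2.2))
              ((none : Option Int), m)).1.getD 0,
             ((PySem.List.pyRange i j 1).foldl (fun bm k =>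
              let r1 := pvSolve dims f i k bm.2
              let r2 := pvSolve dims f (k + 1) j r1.2
              let c := r1.1 + r2.1 + pvW dims i k j
              ((match bm.1 with
                | none => some c
                | some best => if c < best then some c else some best), r2.2))
              ((none : Option Int), m)).2.insert (i, j)
              (((PySem.List.pyRange i j 1).foldl (fun bm k =>
              let r1 := pvSolve dims f i k bm.2
              let r2 := pvSolve dims f (k + 1) j r1.2
              let c := r1.1 + r2.1 + pvW dims i k j
              ((match bm.1 with
                | none => some c
                | some best => if c < best then some c else some best), r2.2))
              ((none : Option Int), m)).1.getD 0)) := by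
          rw [pvSolve]
          simp [hbe, hg]
        have hmc : pvMC dims (f + 1) i j =
            (pvOMin (fun k => pvMC dims f i k + pvMC dims f (k + 1) j + pvW dims i k j)
              (PySem.List.pyRange i j 1) none).getD 0 := by
          simp [pvMC, hlt]
        constructor
        · rw [hres, hmc]
          simp [hkey.1]
        · rw [hres]
          intro a b' v hv
          rw [PySem.Dict.get?_insert] at hv
          by_cases hab : ((a, b') : Int × Int) = (i, j)
          · rw [if_pos hab] at hv
            rw [Prod.ext_iff] at hab
            obtain ⟨rfl, rfl⟩ := hab
            have hveq := Option.some_inj.mp hv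
            subst hveq
            refine ⟨le_of_lt hlt, ?_⟩
            rw [hkey.1, ← hmc]
            exact pvMC_fuel dims (f + 1) _ _ _ hf (by omega)
          · rw [if_neg hab] at hv
            exact hkey.2 a b' v hv
      · -- memo hit
        have hv := hm i j v hg
        have hres : pvSolve dims (f + 1) i j m = (v, m) := by
          rw [pvSolve]; simp [hbe, hg]
        rw [hres]
        exact ⟨hv.2.trans (pvMC_fuel dims (j - i).toNat (f + 1) i j (by omega) hf), hm⟩

-- ---------- A side ----------

theorem pvInit_get :
    ∀ (l : List Int) (t : PySem.Dict (Int × Int) Int) (p : Int × Int),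
      (l.foldl (fun d x => d.insert (x, x) (0 : Int)) t).get? p =
        if p.1 = p.2 ∧ p.1 ∈ l then some 0 else t.get? p := by
  intro l
  induction l with
  | nil => intro t p; simp
  | cons x tl ih =>
    intro t p
    simp only [List.foldl_cons]
    rw [ih]
    rw [PySem.Dict.get?_insert]
    by_cases h1 : p.1 = p.2 ∧ p.1 ∈ tl
    · obtain ⟨he, hmem⟩ := h1
      rw [he] at hmem
      simp [he, hmem]
    · rw [if_neg h1]
      by_cases h2 : p = (x, x)
      · simp [h2]
      · rw [if_neg h2]
        have : ¬ (p.1 = p.2 ∧ p.1 ∈ x :: tl) := by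
          rintro ⟨he, hm⟩
          rcases List.mem_cons.mp hm with h | h
          · exact h2 (by cases p; simp_all)
          · exact h1 ⟨he, h⟩
        rw [if_neg this]

-- invariant: all entries of gap ≤ g are present and correct
def pvHasUpto (dims : List (List Int)) (g : Int) (t : PySem.Dict (Int × Int) Int) : Prop :=
  ∀ (i j : Int), 0 ≤ i → i ≤ j → j < (dims.length : Int) → j - i ≤ g →
    t.get? (i, j) = some (pvMC dims (j - i).toNat i j)

-- one iteration of A's i-loop at a fixed gap, fully characterised
theorem pvStepA (dims : List (List Int)) (gap M : Int) (hg1 : 1 ≤ gap) (h0 : 0 ≤ M)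
    (hMn : M + gap < (dims.length : Int)) (t' : PySem.Dict (Int × Int) Int)
    (ht' : pvHasUpto dims (gap - 1) t') (p : Int × Int) :
    (t'.insert (M, M + gap)
      (((PySem.List.pyRange M (M + gap) 1).foldl (fun cost k =>
          let the_cost := t'.getD (M, k) 0 + t'.getD (k + 1, M + gap) 0 + pvW dims M k (M + gap)
          some (match cost with
                | none => the_cost
                | some c => min c the_cost)) none).getD 0)).get? p
      = if p = (M, M + gap) then some (pvMC dims gap.toNat M (M + gap)) else t'.get? p := by
  obtain ⟨g, hgN⟩ : ∃ g, gap.toNat = g + 1 := ⟨gap.toNat - 1, by omega⟩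
  have hval : ((PySem.List.pyRange M (M + gap) 1).foldl (fun cost k =>
          let the_cost := t'.getD (M, k) 0 + t'.getD (k + 1, M + gap) 0 + pvW dims M k (M + gap)
          some (match cost with
                | none => the_cost
                | some c => min c the_cost)) none).getD 0 = pvMC dims gap.toNat M (M + gap) := by
    have hfold : ((PySem.List.pyRange M (M + gap) 1).foldl (fun cost k =>
          let the_cost := t'.getD (M, k) 0 + t'.getD (k + 1, M + gap) 0 + pvW dims M k (M + gap)
          some (match cost with
                | none => the_cost
                | some c => min c the_cost)) none)
        = pvOMin (fun k => t'.getD (M, k) 0 + t'.getD (k + 1, M + gap) 0 + pvW dims M k (M + gap))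
            (PySem.List.pyRange M (M + gap) 1) none := rfl
    rw [hfold]
    rw [pvOMin_congr _ (fun k => pvMC dims g M k + pvMC dims g (k + 1) (M + gap) + pvW dims M k (M + gap))
        (PySem.List.pyRange M (M + gap) 1) none ?_]
    · rw [hgN]
      simp only [pvMC, if_pos (show M < M + gap by omega)]
    · intro k hk
      rw [PySem.List.mem_pyRange_one] at hk
      have hA := ht' M k h0 hk.1 (by omega) (by omega)
      have hB := ht' (k + 1) (M + gap) (by omega) (by omega) (by omega) (by omega)
      rw [PySem.Dict.getD_of_get?_eq_some t' 0 hA, PySem.Dict.getD_of_get?_eq_some t' 0 hB]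
      rw [pvMC_fuel dims (k - M).toNat g M k (by omega) (by omega),
          pvMC_fuel dims (M + gap - (k + 1)).toNat g (k + 1) (M + gap) (by omega) (by omega)]
  rw [PySem.Dict.get?_insert, hval]

-- A's inner i-loop over range(0, m), fully characterised
theorem pvInner (dims : List (List Int)) (gap : Int) (hg1 : 1 ≤ gap) :
    ∀ (m : Nat) (t : PySem.Dict (Int × Int) Int), ((m : Int)) ≤ (dims.length : Int) - gap →
      pvHasUpto dims (gap - 1) t →
      ∀ (p : Int × Int),
        ((PySem.List.pyRange 0 (m : Int) 1).foldl (fun costs i =>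
          let j := i + gap
          let cost : Option Int :=
            (PySem.List.pyRange i j 1).foldl (fun cost k =>
              let the_cost := costs.getD (i, k) 0 + costs.getD (k + 1, j) 0 + pvW dims i k j
              some (match cost with
                    | none => the_cost
                    | some c => min c the_cost)) none
          costs.insert (i, j) (cost.getD 0)) t).get? p =
        if p.2 = p.1 + gap ∧ 0 ≤ p.1 ∧ p.1 < (m : Int)
        then some (pvMC dims gap.toNat p.1 p.2)
        else t.get? p := by
  intro m
  induction m with
  | zero =>
    intro t _ _ p
    have h0nil : PySem.List.pyRange 0 (((0 : Nat) : Int)) 1 = [] :=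
      PySem.List.pyRange_one_eq_nil (by norm_num)
    rw [h0nil]
    simp only [List.foldl_nil]
    rw [if_neg (by rintro ⟨-, h1, h2⟩; simp at h2; omega)]
  | succ m ih =>
    intro t hm ht p
    have hsplit : PySem.List.pyRange 0 ((m + 1 : Nat) : Int) 1 =
        PySem.List.pyRange 0 (m : Int) 1 ++ [(m : Int)] := by
      push_cast
      exact PySem.List.pyRange_one_succ_right (show (0 : Int) ≤ (m : Int) from Int.natCast_nonneg m)
    rw [hsplit, List.foldl_append]
    simp only [List.foldl_cons, List.foldl_nil]
    have ihp := ih t (by omega) ht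
    have ht' : pvHasUpto dims (gap - 1)
        ((PySem.List.pyRange 0 (m : Int) 1).foldl (fun costs i =>
          let j := i + gap
          let cost : Option Int :=
            (PySem.List.pyRange i j 1).foldl (fun cost k =>
              let the_cost := costs.getD (i, k) 0 + costs.getD (k + 1, j) 0 + pvW dims i k j
              some (match cost with
                    | none => the_cost
                    | some c => min c the_cost)) none
          costs.insert (i, j) (cost.getD 0)) t) := by
      intro i j h0 hij hjn hd
      rw [ihp (i, j), if_neg (by rintro ⟨h1, -, -⟩; simp at h1; omega)]
      exact ht i j h0 hij hjn hd
    rw [pvStepA dims gap (m : Int) hg1 (by omega) (by omega) _ ht' p]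
    obtain ⟨a, b⟩ := p
    by_cases hp : ((a, b) : Int × Int) = ((m : Int), (m : Int) + gap)
    · rw [Prod.mk.injEq] at hp
      obtain ⟨rfl, rfl⟩ := hp
      rw [if_pos rfl, if_pos ⟨rfl, by omega, by push_cast; omega⟩]
    · rw [if_neg hp, ihp (a, b)]
      by_cases hc : b = a + gap ∧ 0 ≤ a ∧ a < (m : Int)
      · rw [if_pos hc, if_pos ⟨hc.1, hc.2.1, by push_cast; omega⟩]
      · rw [if_neg hc, if_neg ?_]
        rintro ⟨h1, h2, h3⟩
        have ham : a = (m : Int) := by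
          by_contra hne
          exact hc ⟨h1, h2, by push_cast at h3; omega⟩
        subst ham
        exact hp (by simp at h1 ⊢; omega)

-- A's outer gap-loop maintains the table invariant
theorem pvOuter (dims : List (List Int)) :
    ∀ (g : Nat), ((g : Int)) ≤ (dims.length : Int) - 1 →
      pvHasUpto dims (g : Int)
        ((PySem.List.pyRange 1 (1 + (g : Int)) 1).foldl (fun costs gap =>
          (PySem.List.pyRange 0 ((dims.length : Int) - gap) 1).foldl (fun costs i =>
            let j := i + gap
            let cost : Option Int :=
              (PySem.List.pyRange i j 1).foldl (fun cost k =>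
                let the_cost := costs.getD (i, k) 0 + costs.getD (k + 1, j) 0 + pvW dims i k j
                some (match cost with
                      | none => the_cost
                      | some c => min c the_cost)) none
            costs.insert (i, j) (cost.getD 0)) costs)
          ((PySem.List.pyRange 0 (dims.length : Int) 1).foldl
            (fun d x => d.insert (x, x) 0) PySem.Dict.empty)) := by
  intro g
  induction g with
  | zero =>
    intro hg i j h0 hij hjn hd
    have h0nil : PySem.List.pyRange 1 (1 + ((0 : Nat) : Int)) 1 = [] :=
      PySem.List.pyRange_one_eq_nil (by norm_num)
    rw [h0nil]
    simp only [List.foldl_nil]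
    have hij' : i = j := by push_cast at hd; omega
    subst hij'
    rw [pvInit_get (PySem.List.pyRange 0 (dims.length : Int) 1) PySem.Dict.empty (i, i)]
    rw [if_pos ⟨rfl, by rw [PySem.List.mem_pyRange_one]; omega⟩]
    have : (i - i).toNat = 0 := by omega
    rw [this]
    rfl
  | succ g ih =>
    intro hg
    have hsplit : PySem.List.pyRange 1 (1 + ((g + 1 : Nat) : Int)) 1 =
        PySem.List.pyRange 1 (1 + (g : Int)) 1 ++ [1 + (g : Int)] := by
      push_cast
      rw [show (1 : Int) + ((g : Int) + 1) = (1 + (g : Int)) + 1 by ring]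
      exact PySem.List.pyRange_one_succ_right (show (1 : Int) ≤ 1 + (g : Int) by omega)
    rw [hsplit, List.foldl_append]
    simp only [List.foldl_cons, List.foldl_nil]
    have ihg := ih (by omega)
    set T := ((PySem.List.pyRange 1 (1 + (g : Int)) 1).foldl (fun costs gap =>
          (PySem.List.pyRange 0 ((dims.length : Int) - gap) 1).foldl (fun costs i =>
            let j := i + gap
            let cost : Option Int :=
              (PySem.List.pyRange i j 1).foldl (fun cost k =>
                let the_cost := costs.getD (i, k) 0 + costs.getD (k + 1, j) 0 + pvW dims i k j
                some (match cost with
                      | none => the_cost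
                      | some c => min c the_cost)) none
            costs.insert (i, j) (cost.getD 0)) costs)
          ((PySem.List.pyRange 0 (dims.length : Int) 1).foldl
            (fun d x => d.insert (x, x) 0) PySem.Dict.empty)) with hT
    have hTg : pvHasUpto dims ((1 + (g : Int)) - 1) T := by
      rw [show (1 + (g : Int)) - 1 = (g : Int) by omega]
      exact ihg
    have hcast : ((((dims.length : Int) - (1 + (g : Int))).toNat : Int)) =
        (dims.length : Int) - (1 + (g : Int)) := by omega
    have hchar := pvInner dims (1 + (g : Int)) (by omega)
      (((dims.length : Int) - (1 + (g : Int))).toNat) T (by omega) hTg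
    rw [hcast] at hchar
    intro i j h0 hij hjn hd
    rw [hchar (i, j)]
    by_cases hji : j - i ≤ (g : Int)
    · rw [if_neg (by rintro ⟨h1, -, -⟩; omega)]
      exact ihg i j h0 hij hjn hji
    · have hje : j = i + (1 + (g : Int)) := by push_cast at hd; omega
      rw [if_pos ⟨hje, h0, by omega⟩]
      have : (j - i).toNat = (1 + (g : Int)).toNat := by omega
      rw [this]

-- ===== VERDICT (by name: the statement is the Claim_ definition above) =====
theorem buttom_up_dynamic_programming_spec : Claim_equal_buttom_up_dynamic_programming := by
  intro dims _ hpre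
  unfold Spec_buttom_up_dynamic_programming
  obtain ⟨hne, -⟩ := hpre
  have hlen : dims.length ≠ 0 := by
    intro h; exact hne (List.length_eq_zero_iff.mp h)
  have hn : 1 ≤ (dims.length : Int) := by omega
  have hGood : pvGoodM dims PySem.Dict.empty := by
    intro i j v hv
    rw [PySem.Dict.get?_empty] at hv
    exact absurd hv (by simp)
  have hB := pvSolve_spec dims dims.length 0 ((dims.length : Int) - 1) PySem.Dict.empty
    (by omega) (by omega) hGood
  have hBval : buttom_up_dynamic_programming_alt dims =
      pvMC dims dims.length 0 ((dims.length : Int) - 1) := hB.1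
  have hcast : ((((dims.length : Int) - 1).toNat : Nat) : Int) = (dims.length : Int) - 1 := by
    omega
  have hOut := pvOuter dims (((dims.length : Int) - 1).toNat) (by omega)
  rw [hcast, show (1 : Int) + ((dims.length : Int) - 1) = (dims.length : Int) by ring] at hOut
  have hget := hOut 0 ((dims.length : Int) - 1) le_rfl (by omega) (by omega) (by omega)
  have hAval : buttom_up_dynamic_programming dims =
      pvMC dims (((dims.length : Int) - 1 - 0).toNat) 0 ((dims.length : Int) - 1) :=
    PySem.Dict.getD_of_get?_eq_some _ 0 hget
  rw [hAval, hBval]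
  exact pvMC_fuel dims (((dims.length : Int) - 1 - 0).toNat) dims.length 0
    ((dims.length : Int) - 1) (by omega) (by omega)
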